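-- pv_equiv track=rewrite | github.com/EzekielUmanmah/boilerplate-budget-app | budget.py | xAxis
-- ===== SOURCE A (Python) =====
-- def xAxis(budgetTitles):
--     longestTitle = max(budgetTitles, key=len)
--     line = ''
--
--     for x in range(len(longestTitle)):
--         subline = ''
--         for title in budgetTitles:
--             try:
--                 subline+=str(title[x]) + '  '
--             except:
--                 subline+='   '
--                 pass
--         line+='     '+subline+'\n'
--     return line
-- ===== SOURCE B (Python) =====
-- def xAxis(budgetTitles):
--     # Transposed head-peeling: pop one character column at a time instead of indexing.
--     rows = [list(t) for t in budgetTitles]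
--     lines = []
--     while any(rows):
--         cell = ''
--         new = []
--         for r in rows:
--             if r:
--                 cell += r[0] + '  '
--                 new.append(r[1:])
--             else:
--                 cell += '   '
--                 new.append(r)
--         lines.append('     ' + cell + '\n')
--         rows = new
--     return ''.join(lines)
-- ===== Notes on version B (the rewrite author's own statement) =====
-- stated objective: alternative
-- what changed: B transposes by repeatedly peeling the head character of every title (no max-length computation, no per-title indexing with try/except), stopping when all rows are exhausted.
import Mathlib
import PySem

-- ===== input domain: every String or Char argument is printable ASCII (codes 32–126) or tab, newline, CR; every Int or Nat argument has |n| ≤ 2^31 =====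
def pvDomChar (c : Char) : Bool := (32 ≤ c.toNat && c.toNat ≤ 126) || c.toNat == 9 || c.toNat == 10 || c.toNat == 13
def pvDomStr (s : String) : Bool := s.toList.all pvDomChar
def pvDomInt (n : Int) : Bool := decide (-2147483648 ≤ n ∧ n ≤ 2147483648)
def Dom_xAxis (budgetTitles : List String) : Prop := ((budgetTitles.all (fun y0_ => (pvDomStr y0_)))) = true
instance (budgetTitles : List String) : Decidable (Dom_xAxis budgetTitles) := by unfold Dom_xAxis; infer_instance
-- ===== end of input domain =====

-- B peels the head character of every title column by column (no max-length scan, no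
-- indexing with try/except); alternative structure, same cost.
-- A raises ValueError on the empty list; Pre_xAxis excludes it (B would return "" there).

-- ===== PORT A =====
-- A, per column index x of the longest title, appends the x-th character (or blanks) of
-- every title; strings are handled as char lists (PySem convention), wrapped at the end.
def xAxisChars (rows : List (List Char)) : List Char :=
  match PySem.List.max? rows (fun t => t.length) with
  | none => []   -- Python: max() raises ValueError here; excluded by Pre_xAxis
  | some longestTitle =>
    (PySem.List.pyRange 0 (longestTitle.length : Int)).foldl (fun line x =>
      line ++ ([' ', ' ', ' ', ' ', ' '] ++
        (rows.foldl (fun subline title =>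
          subline ++ (match PySem.List.pyGet? title x with
                      | some c => [c, ' ', ' ']        -- try: title[x] + '  '
                      | none => [' ', ' ', ' ']))      -- except: '   '
          []) ++ ['\n'])) []

def xAxis (budgetTitles : List String) : String :=
  String.ofList (xAxisChars (budgetTitles.map String.toList))

-- ===== PORT B =====
-- one pass over the rows: emit head cell of each row and keep the tails
def popHeads (rows : List (List Char)) : List Char × List (List Char) :=
  match rows with
  | [] => ([], [])
  | r :: rs =>
    let p := popHeads rs
    match r with
    | [] => ([' ', ' ', ' '] ++ p.1, [] :: p.2)
    | c :: cs => ([c, ' ', ' '] ++ p.1, cs :: p.2)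

theorem popHeads_sum_lt (rows : List (List Char))
    (h : rows.any (fun r => !r.isEmpty) = true) :
    ((popHeads rows).2.map List.length).sum < (rows.map List.length).sum := by
  induction rows with
  | nil => simp at h
  | cons r rs ih =>
    simp only [List.any_cons, Bool.or_eq_true] at h
    cases r with
    | nil =>
      simp only [popHeads, List.map_cons, List.sum_cons, List.length_nil]
      rcases h with h | h
      · simp at h
      · exact Nat.add_lt_add_left (ih h) 0
    | cons c cs =>
      simp only [popHeads, List.map_cons, List.sum_cons, List.length_cons]
      have : ((popHeads rs).2.map List.length).sum ≤ ((rs.map List.length)).sum := by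
        clear h ih
        induction rs with
        | nil => simp [popHeads]
        | cons r' rs' ih' =>
          cases r' <;>
            simp only [popHeads, List.map_cons, List.sum_cons, List.length_cons,
              List.length_nil] <;> omega
      omega

def colLoop (rows : List (List Char)) : List Char :=
  if h : rows.any (fun r => !r.isEmpty) then
    let p := popHeads rows
    [' ', ' ', ' ', ' ', ' '] ++ p.1 ++ ['\n'] ++ colLoop p.2
  else []
termination_by (rows.map List.length).sum
decreasing_by exact popHeads_sum_lt rows h

def xAxis_alt (budgetTitles : List String) : String :=
  String.ofList (colLoop (budgetTitles.map String.toList))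

-- ===== PRECONDITION & SPEC =====
-- A raises ValueError on the empty list (max() of an empty sequence); excluded.
def Pre_xAxis (budgetTitles : List String) : Prop := budgetTitles ≠ []
instance (budgetTitles : List String) : Decidable (Pre_xAxis budgetTitles) := by
  unfold Pre_xAxis; infer_instance
def pvWitness_xAxis : List String := ["food", "tax"]

def Spec_xAxis (budgetTitles : List String) (out : String) : Prop := out = xAxis_alt budgetTitles
instance (budgetTitles : List String) (out : String) : Decidable (Spec_xAxis budgetTitles out) := by
  unfold Spec_xAxis; infer_instance

-- ===== CLAIM (what is proved, stated in full; the proofs are below) =====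
def Claim_equal_xAxis : Prop := ∀ (budgetTitles : List String), Dom_xAxis budgetTitles → Pre_xAxis budgetTitles → Spec_xAxis budgetTitles (xAxis budgetTitles)

-- ===== LEMMAS AND PROOFS =====

-- the character cell a row contributes at column k
def cellAt (r : List Char) (k : Nat) : List Char :=
  match r[k]? with
  | some c => [c, ' ', ' ']
  | none => [' ', ' ', ' ']

-- one full column, flat form
def colAt (rows : List (List Char)) (k : Nat) : List Char :=
  rows.flatMap (fun r => cellAt r k)

def maxLen (rows : List (List Char)) : Nat :=
  rows.foldr (fun r m => max r.length m) 0

theorem cellAt_succ (r : List Char) (k : Nat) : cellAt r (k + 1) = cellAt r.tail k := by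
  cases r <;> simp [cellAt]

theorem colAt_succ (rows : List (List Char)) (k : Nat) :
    colAt rows (k + 1) = colAt (rows.map List.tail) k := by
  simp [colAt, List.flatMap_map, cellAt_succ]

theorem popHeads_fst (rows : List (List Char)) : (popHeads rows).1 = colAt rows 0 := by
  induction rows with
  | nil => simp [popHeads, colAt]
  | cons r rs ih => cases r <;> simp [popHeads, colAt, cellAt] at ih ⊢ <;> exact ih

theorem popHeads_snd (rows : List (List Char)) : (popHeads rows).2 = rows.map List.tail := by
  induction rows with
  | nil => simp [popHeads]
  | cons r rs ih => cases r <;> simp [popHeads, ih]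

theorem maxLen_eq_zero_iff (rows : List (List Char)) :
    maxLen rows = 0 ↔ rows.any (fun r => !r.isEmpty) = false := by
  induction rows with
  | nil => simp [maxLen]
  | cons r rs ih =>
    simp only [maxLen, List.foldr_cons, List.any_cons, Bool.or_eq_false_iff] at ih ⊢
    cases r <;> simp_all

theorem maxLen_map_tail (rows : List (List Char)) :
    maxLen (rows.map List.tail) = maxLen rows - 1 := by
  induction rows with
  | nil => simp [maxLen]
  | cons r rs ih =>
    simp only [maxLen, List.map_cons, List.foldr_cons] at ih ⊢
    cases r with
    | nil => simp_all
    | cons c cs => simp_all; omega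

theorem le_maxLen_of_mem {rows : List (List Char)} {r : List Char} (h : r ∈ rows) :
    r.length ≤ maxLen rows := by
  induction rows with
  | nil => simp at h
  | cons x xs ih =>
    simp only [maxLen, List.foldr_cons]
    rcases List.mem_cons.1 h with rfl | h
    · exact Nat.le_max_left _ _
    · exact le_trans (ih h) (Nat.le_max_right _ _)

theorem maxLen_le {rows : List (List Char)} {n : Nat}
    (h : ∀ r ∈ rows, r.length ≤ n) : maxLen rows ≤ n := by
  induction rows with
  | nil => simp [maxLen]
  | cons x xs ih =>
    simp only [maxLen, List.foldr_cons]
    exact Nat.max_le.2 ⟨h x (by simp), ih (fun r hr => h r (by simp [hr]))⟩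

-- B's loop equals the flat column-by-column form, iterated maxLen times
theorem colLoop_eq (rows : List (List Char)) :
    colLoop rows =
      (List.range (maxLen rows)).flatMap
        (fun k => [' ', ' ', ' ', ' ', ' '] ++ colAt rows k ++ ['\n']) := by
  generalize hn : maxLen rows = n
  induction n generalizing rows with
  | zero =>
    rw [colLoop, dif_neg]
    · simp
    · simp [(maxLen_eq_zero_iff rows).1 hn]
  | succ m ih =>
    have hany : rows.any (fun r => !r.isEmpty) = true := by
      by_contra h
      have := (maxLen_eq_zero_iff rows).2 (by simpa using h)
      omega
    rw [colLoop]
    simp only [hany, dif_pos, popHeads_fst, popHeads_snd]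
    have htails : maxLen (rows.map List.tail) = m := by
      simp [maxLen_map_tail, hn]
    rw [ih _ htails, List.range_succ_eq_map]
    simp only [List.flatMap_cons, List.flatMap_map, Nat.succ_eq_add_one]
    simp [colAt_succ, List.append_assoc]

-- A's nested folds equal the same flat form
theorem xAxisChars_eq (rows : List (List Char)) (hne : rows ≠ []) :
    xAxisChars rows =
      (List.range (maxLen rows)).flatMap
        (fun k => [' ', ' ', ' ', ' ', ' '] ++ colAt rows k ++ ['\n']) := by
  unfold xAxisChars
  cases hmax : PySem.List.max? rows (fun t => t.length) with
  | none => exact absurd ((PySem.List.max?_eq_none_iff _ _).1 hmax) hne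
  | some longest =>
    dsimp only
    have hlen : longest.length = maxLen rows :=
      le_antisymm (le_maxLen_of_mem (PySem.List.max?_mem hmax))
        (maxLen_le (PySem.List.max?_isMax hmax))
    rw [hlen, PySem.List.pyRange_zero_natCast,
        List.foldl_map, PySem.List.foldl_append_eq_flatMap]
    simp only [List.nil_append]
    congr 1
    funext k
    congr 1
    rw [PySem.List.foldl_append_eq_flatMap]
    simp [colAt, cellAt, PySem.List.pyGet?_natCast]

-- ===== VERDICT (by name: the statement is the Claim_ definition above) =====
theorem xAxis_spec : Claim_equal_xAxis := by
  intro budgetTitles _ hpre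
  unfold Spec_xAxis xAxis xAxis_alt
  rw [xAxisChars_eq _ (by simpa using hpre), colLoop_eq]
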